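-- pv_equiv track=rewrite | github.com/ENCODE-DCC/ptools | diff/createDiff.py | getfseq
-- ===== SOURCE A (Python) =====
-- def cigparse(cigar):
--     l1 = []
--     num1 = ""
--     for c1 in cigar:
--         if c1 in "0123456789":
--             num1 = num1 + c1
--         else:
--             l1.append([int(num1), c1])
--             num1 = ""
--     return l1
--
-- def getfseq(cigar, seq):
--     a = cigparse(cigar)
--     # b is the sequence
--     b = seq
--     start = 0
--     m = ""
--     k = ""
--     for i in range(0, len(a)):
--         if a[i][1] in "M":
--             start = start + a[i][0]
--             k = ""
--         if a[i][1] in "N":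
--             start = start
--             k = ""
--         if a[i][1] in "SIX":
--             tup = b[start : start + a[i][0]]
--             k = tup + ":" + str(a[i][1]) + "-"
--             start = start + a[i][0]
--         m = m + k
--     return m[0 : len(m) - 1]
-- ===== SOURCE B (Python) =====
-- def getfseq(cigar, seq):
--     # Single fused pass over the CIGAR characters (no intermediate parse list);
--     # pieces are collected in a list and joined once at the end.
--     num = ""
--     start = 0
--     pieces = []
--     k = ""
--     for c in cigar:
--         if c in "0123456789":
--             num += c
--         else:
--             n = int(num)
--             num = ""
--             if c == 'M':
--                 start += n
--                 k = ""
--             elif c == 'N':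
--                 k = ""
--             elif c in "SIX":
--                 k = seq[start:start + n] + ":" + c + "-"
--                 start += n
--             pieces.append(k)
--     return "".join(pieces)[:-1]
-- ===== Notes on version B (the rewrite author's own statement) =====
-- stated objective: alternative
-- what changed: Fuses A's two sequential passes (cigparse building an [count, op] list, then a formatting loop over it) into a single pass over the CIGAR characters with a digit buffer, collecting pieces in a list joined once at the end instead of repeated string concatenation.
import Mathlib
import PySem

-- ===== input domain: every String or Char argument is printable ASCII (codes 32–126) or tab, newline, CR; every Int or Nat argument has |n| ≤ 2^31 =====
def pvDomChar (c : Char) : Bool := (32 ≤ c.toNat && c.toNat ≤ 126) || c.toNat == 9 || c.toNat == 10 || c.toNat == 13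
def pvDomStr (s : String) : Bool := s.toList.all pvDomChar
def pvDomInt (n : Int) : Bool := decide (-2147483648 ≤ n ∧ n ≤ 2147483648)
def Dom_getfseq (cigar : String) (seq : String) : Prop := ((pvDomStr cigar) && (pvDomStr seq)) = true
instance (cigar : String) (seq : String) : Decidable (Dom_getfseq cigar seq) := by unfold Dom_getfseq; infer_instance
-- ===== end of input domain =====

-- B fuses A's two passes (parse list, then format loop) into one pass over the
-- CIGAR characters and joins collected pieces once; same return value (objective: alternative decomposition).

-- int(num): exact where num is a nonempty digit run (guaranteed by Pre_); 0 stands in where Python raises ValueError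
def pvIntP (num : List Char) : Int := (PySem.Int.ofChars? num).getD 0

-- ===== PORT A =====
-- cigparse: l1/num1 accumulator fold over the characters ('c1 in "0123456789"' = membership in those chars)
def cigparse (cigar : String) : List (Int × Char) :=
  (cigar.toList.foldl
    (fun (st : List (Int × Char) × List Char) c1 =>
      if (['0','1','2','3','4','5','6','7','8','9'].contains c1) then (st.1, st.2 ++ [c1])
      else (st.1 ++ [(pvIntP st.2, c1)], []))
    ([], [])).1

-- one iteration of A's loop body: state (start, m, k); three sequential ifs as in the source
def stepA (b : List Char) (st : Int × List Char × List Char) (p : Int × Char) :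
    Int × List Char × List Char :=
  let start := st.1; let m := st.2.1; let k := st.2.2
  let sk1 : Int × List Char := if (['M'].contains p.2) then (start + p.1, []) else (start, k)
  let sk2 : Int × List Char := if (['N'].contains p.2) then (sk1.1, []) else sk1
  let sk3 : Int × List Char :=
    if (['S','I','X'].contains p.2) then
      let tup := PySem.List.slice b (some sk2.1) (some (sk2.1 + p.1))
      (sk2.1 + p.1, tup ++ ':' :: p.2 :: ['-'])
    else sk2
  (sk3.1, m ++ sk3.2, sk3.2)

def getfseq (cigar : String) (seq : String) : String :=
  let a := cigparse cigar
  let b := seq.toList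
  let fin := a.foldl (stepA b) (0, [], [])
  let m := fin.2.1
  String.ofList (PySem.List.slice m (some 0) (some ((m.length : Int) - 1)))  -- m[0:len(m)-1]

-- ===== PORT B =====
-- dispatch on one operation char: returns the new (start, k)
def stepCore (b : List Char) (start : Int) (k : List Char) (n : Int) (c : Char) :
    Int × List Char :=
  if c = 'M' then (start + n, [])
  else if c = 'N' then (start, [])
  else if (['S','I','X'].contains c) then
    (start + n, PySem.List.slice b (some start) (some (start + n)) ++ ':' :: c :: ['-'])
  else (start, k)

-- one fused iteration: state (num, start, pieces, k)
def stepB (b : List Char) (st : List Char × Int × List (List Char) × List Char) (c : Char) :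
    List Char × Int × List (List Char) × List Char :=
  let num := st.1; let start := st.2.1; let pieces := st.2.2.1; let k := st.2.2.2
  if (['0','1','2','3','4','5','6','7','8','9'].contains c) then (num ++ [c], start, pieces, k)
  else
    let n := pvIntP num
    let sk := stepCore b start k n c
    ([], sk.1, pieces ++ [sk.2], sk.2)

def getfseq_alt (cigar : String) (seq : String) : String :=
  let b := seq.toList
  let fin := cigar.toList.foldl (stepB b) ([], 0, [], [])
  let m := fin.2.2.1.flatten   -- "".join(pieces)
  String.ofList (PySem.List.slice m (some 0) (some ((m.length : Int) - 1)))  -- [:-1]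

-- ===== PRECONDITION & SPEC =====
-- Pre_ excludes CIGARs in which some operation char is not immediately preceded by a digit:
-- there Python A raises ValueError at int("") (so does B); the ports are total with a 0 stand-in.
def Pre_getfseq (cigar : String) (seq : String) : Prop :=
  ∀ i ∈ List.range cigar.toList.length,
    (['0','1','2','3','4','5','6','7','8','9'].contains (cigar.toList.getD i ' ')) = false →
    0 < i ∧ (['0','1','2','3','4','5','6','7','8','9'].contains (cigar.toList.getD (i-1) ' ')) = true
instance (cigar : String) (seq : String) : Decidable (Pre_getfseq cigar seq) := by
  unfold Pre_getfseq; infer_instance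

def pvWitness_getfseq : String × String := ("3S4M2I", "ABCDEFGHIJ")

def Spec_getfseq (cigar : String) (seq : String) (out : String) : Prop := out = getfseq_alt cigar seq
instance (cigar : String) (seq : String) (out : String) : Decidable (Spec_getfseq cigar seq out) := by
  unfold Spec_getfseq; infer_instance

-- ===== CLAIM (what is proved, stated in full; the proofs are below) =====
def Claim_equal_getfseq : Prop := ∀ (cigar : String) (seq : String), Dom_getfseq cigar seq → Pre_getfseq cigar seq → Spec_getfseq cigar seq (getfseq cigar seq)

-- ===== LEMMAS AND PROOFS =====

-- recursive view of cigparse's accumulation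
def cpAux (cs : List Char) (num : List Char) : List (Int × Char) :=
  match cs with
  | [] => []
  | c :: cs' =>
    if (['0','1','2','3','4','5','6','7','8','9'].contains c) then cpAux cs' (num ++ [c])
    else (pvIntP num, c) :: cpAux cs' []

theorem cp_foldl (cs : List Char) (l1 : List (Int × Char)) (num : List Char) :
    (cs.foldl
      (fun (st : List (Int × Char) × List Char) c1 =>
        if (['0','1','2','3','4','5','6','7','8','9'].contains c1) then (st.1, st.2 ++ [c1])
        else (st.1 ++ [(pvIntP st.2, c1)], []))
      (l1, num)).1 = l1 ++ cpAux cs num := by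
  induction cs generalizing l1 num with
  | nil => simp [cpAux]
  | cons c cs ih =>
    simp only [List.foldl_cons, cpAux]
    split_ifs with h
    · exact ih l1 (num ++ [c])
    · rw [ih]; simp

-- A's loop body expressed through B's dispatch stepCore
theorem stepA_core (b : List Char) (start : Int) (m k : List Char) (n : Int) (c : Char) :
    stepA b (start, m, k) (n, c) =
      ((stepCore b start k n c).1, m ++ (stepCore b start k n c).2, (stepCore b start k n c).2) := by
  by_cases hM : c = 'M'
  · subst hM; simp [stepA, stepCore]
  · by_cases hN : c = 'N'
    · subst hN; simp [stepA, stepCore]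
    · by_cases hS : (['S','I','X'].contains c) = true
      · have hc : c = 'S' ∨ c = 'I' ∨ c = 'X' := by simpa using hS
        rcases hc with h | h | h <;> subst h <;> simp [stepA, stepCore]
      · simp [stepA, stepCore, hM, hN]

-- the fusion invariant: one fused pass over the chars = parse (cpAux) then A's fold
theorem fuse (b : List Char) (cs : List Char) (num : List Char) (start : Int)
    (pieces : List (List Char)) (k : List Char) :
    (cs.foldl (stepB b) (num, start, pieces, k)).2.2.1.flatten =
      ((cpAux cs num).foldl (stepA b) (start, pieces.flatten, k)).2.1 ∧
    (cs.foldl (stepB b) (num, start, pieces, k)).2.1 =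
      ((cpAux cs num).foldl (stepA b) (start, pieces.flatten, k)).1 ∧
    (cs.foldl (stepB b) (num, start, pieces, k)).2.2.2 =
      ((cpAux cs num).foldl (stepA b) (start, pieces.flatten, k)).2.2 := by
  induction cs generalizing num start pieces k with
  | nil => simp [cpAux]
  | cons c cs ih =>
    simp only [List.foldl_cons, cpAux, stepB]
    split_ifs with h
    · exact ih (num ++ [c]) start pieces k
    · rw [List.foldl_cons, stepA_core]
      have := ih [] (stepCore b start k (pvIntP num) c).1
        (pieces ++ [(stepCore b start k (pvIntP num) c).2]) (stepCore b start k (pvIntP num) c).2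
      simpa [List.flatten_append] using this

-- ===== VERDICT (by name: the statement is the Claim_ definition above) =====
theorem getfseq_spec : Claim_equal_getfseq := by
  intro cigar seq _ _
  show getfseq cigar seq = getfseq_alt cigar seq
  have h1 := cp_foldl cigar.toList [] []
  have h2 := (fuse seq.toList cigar.toList [] 0 [] []).1
  simp only [List.flatten_nil] at h2
  simp only [getfseq, getfseq_alt, cigparse]
  rw [h1, List.nil_append, h2]
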